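-- pv_equiv track=rewrite | github.com/grayguy2002/sFWI | sFWI/experiments/daps_sampling.py | get_sorted_similar_groups
-- ===== SOURCE A (Python) =====
-- def get_sorted_similar_groups(similar_groups, min_group_size=2):
--     """将发现的相似对合并成完整的、不重复的组"""
--     processed_seeds = set()
--     sorted_groups = []
--     for seed, (similar_seeds, _) in similar_groups.items():
--         if seed in processed_seeds:
--             continue
--         current_group = {seed} | set(similar_seeds)
--         while True:
--             new_additions = set()
--             for s in current_group:
--                 if s in similar_groups:
--                     new_additions.update(similar_groups[s][0])
--             if new_additions.issubset(current_group):
--                 break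
--             current_group.update(new_additions)
--
--         if len(current_group) >= min_group_size:
--             sorted_groups.append(sorted(list(current_group)))
--             processed_seeds.update(current_group)
--     sorted_groups.sort(key=lambda x: x[0])
--     return sorted_groups
-- ===== SOURCE B (Python) =====
-- def get_sorted_similar_groups(similar_groups, min_group_size=2):
--     """Merge similar pairs into complete groups via an explicit-stack DFS over only new frontier nodes."""
--     processed = set()
--     groups = []
--     for seed in similar_groups:
--         if seed in processed:
--             continue
--         visited = {seed}
--         stack = [seed]
--         while stack:
--             s = stack.pop()
--             entry = similar_groups.get(s)
--             if entry is None: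
--                 continue
--             for t in entry[0]:
--                 if t not in visited:
--                     visited.add(t)
--                     stack.append(t)
--         if len(visited) >= min_group_size:
--             groups.append(sorted(visited))
--             processed |= visited
--     groups.sort(key=lambda g: g[0])
--     return groups
-- ===== Notes on version B (the rewrite author's own statement) =====
-- stated objective: alternative
-- what changed: Replaces A's fixpoint loop, which rescans the entire current group and re-reads every member's neighbour list on every iteration until nothing new appears, with a worklist DFS that processes each node once and pushes only newly discovered nodes.
import Mathlib
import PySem

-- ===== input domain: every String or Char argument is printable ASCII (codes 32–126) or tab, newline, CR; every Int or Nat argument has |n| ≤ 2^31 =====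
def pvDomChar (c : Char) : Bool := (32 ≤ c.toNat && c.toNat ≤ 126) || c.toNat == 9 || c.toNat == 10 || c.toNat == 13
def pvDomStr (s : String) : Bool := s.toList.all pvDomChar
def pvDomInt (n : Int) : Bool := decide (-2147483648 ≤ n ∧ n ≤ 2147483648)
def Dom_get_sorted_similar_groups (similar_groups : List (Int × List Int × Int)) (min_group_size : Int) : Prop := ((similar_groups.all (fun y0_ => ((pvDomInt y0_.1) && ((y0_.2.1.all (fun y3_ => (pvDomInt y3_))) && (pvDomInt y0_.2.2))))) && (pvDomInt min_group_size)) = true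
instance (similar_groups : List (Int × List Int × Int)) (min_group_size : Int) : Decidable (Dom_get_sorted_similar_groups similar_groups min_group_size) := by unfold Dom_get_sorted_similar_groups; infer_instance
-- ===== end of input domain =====

-- B replaces A's repeated whole-group rescanning fixpoint by a worklist DFS that expands only newly
-- discovered frontier nodes (objective: alternative algorithm; return value proved identical).

-- shared helper: the finite universe of node labels occurring in the dict; its length only sizes the
-- fuel that makes the ports' loops total (proved sufficient below — the fuel guard is never hit)
def pvU (d : PySem.Dict Int (List Int × Int)) : List Int :=
  d.items.flatMap (fun kv => kv.1 :: kv.2.1)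

-- ===== PORT A =====
-- one pass of A's `new_additions` accumulation: for s in current_group: if s in d: update(d[s][0])
def pvExpandA (d : PySem.Dict Int (List Int × Int)) (g : PySem.Set Int) : PySem.Set Int :=
  List.foldl
    (fun na s =>
      if d.contains s then PySem.Set.update na (((d.get? s).getD ([], 0)).1) else na)
    PySem.Set.empty g

-- A's `while True` fixpoint loop (fuel only for totality)
def pvLoopA (d : PySem.Dict Int (List Int × Int)) : Nat → PySem.Set Int → PySem.Set Int
  | 0, g => g
  | fuel+1, g =>
      let na := pvExpandA d g
      if PySem.Set.issubset na g then g else pvLoopA d fuel (PySem.Set.update g na)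

-- A's loop body over `similar_groups.items()`
def pvStepA (d : PySem.Dict Int (List Int × Int)) (fuel : Nat) (min_group_size : Int)
    (acc : PySem.Set Int × List (List Int)) (kv : Int × List Int × Int) :
    PySem.Set Int × List (List Int) :=
  if PySem.Set.contains acc.1 kv.1 then acc
  else
    let cg := pvLoopA d fuel (PySem.Set.union (PySem.Set.ofList [kv.1]) (PySem.Set.ofList kv.2.1))
    if (cg.length : Int) ≥ min_group_size then
      (PySem.Set.update acc.1 cg, acc.2 ++ [PySem.List.sorted cg (fun x => x)])
    else acc

def get_sorted_similar_groups (similar_groups : List (Int × List Int × Int)) (min_group_size : Int) : List (List Int) :=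
  let d : PySem.Dict Int (List Int × Int) := PySem.Dict.ofList similar_groups
  let st := d.items.foldl (pvStepA d ((pvU d).length + 1) min_group_size) (PySem.Set.empty, [])
  -- key x[0]: every stored group contains its seed, hence is nonempty, so x[0] = headD 0 here
  PySem.List.sorted st.2 (fun g => g.headD 0)

-- ===== PORT B =====
-- body of B's inner `for t in entry[0]` loop: visit-and-push each not-yet-visited neighbour
def pvBfsStep (p : PySem.Set Int × List Int) (t : Int) : PySem.Set Int × List Int :=
  if PySem.Set.contains p.1 t then p else (PySem.Set.add p.1 t, p.2 ++ [t])

-- B's `while stack:` worklist loop; stack.pop() takes the last element (fuel only for totality)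
def pvBfsB (d : PySem.Dict Int (List Int × Int)) : Nat → PySem.Set Int → List Int → PySem.Set Int
  | 0, visited, _ => visited
  | fuel+1, visited, stack =>
      match stack with
      | [] => visited
      | x :: xs =>
          let s := (x :: xs).getLast (List.cons_ne_nil x xs)
          let rest := (x :: xs).dropLast
          match d.get? s with
          | none => pvBfsB d fuel visited rest
          | some entry =>
              let p := List.foldl pvBfsStep (visited, rest) entry.1
              pvBfsB d fuel p.1 p.2

-- B's loop body over `for seed in similar_groups`
def pvStepB (d : PySem.Dict Int (List Int × Int)) (fuel : Nat) (min_group_size : Int)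
    (acc : PySem.Set Int × List (List Int)) (seed : Int) :
    PySem.Set Int × List (List Int) :=
  if PySem.Set.contains acc.1 seed then acc
  else
    let vis := pvBfsB d fuel (PySem.Set.ofList [seed]) [seed]
    if (vis.length : Int) ≥ min_group_size then
      (PySem.Set.union acc.1 vis, acc.2 ++ [PySem.List.sorted vis (fun x => x)])
    else acc

def get_sorted_similar_groups_alt (similar_groups : List (Int × List Int × Int)) (min_group_size : Int) : List (List Int) :=
  let d : PySem.Dict Int (List Int × Int) := PySem.Dict.ofList similar_groups
  let st := d.keys.foldl (pvStepB d (2 * (pvU d).length + 2) min_group_size) (PySem.Set.empty, [])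
  -- key x[0] = headD 0: every stored group contains its seed, hence is nonempty
  PySem.List.sorted st.2 (fun g => g.headD 0)

-- ===== PRECONDITION & SPEC =====
def Spec_get_sorted_similar_groups (similar_groups : List (Int × List Int × Int)) (min_group_size : Int) (out : List (List Int)) : Prop := out = get_sorted_similar_groups_alt similar_groups min_group_size
instance (similar_groups : List (Int × List Int × Int)) (min_group_size : Int) (out : List (List Int)) : Decidable (Spec_get_sorted_similar_groups similar_groups min_group_size out) := by unfold Spec_get_sorted_similar_groups; infer_instance

-- ===== CLAIM (what is proved, stated in full; the proofs are below) =====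
def Claim_equal_get_sorted_similar_groups : Prop := ∀ (similar_groups : List (Int × List Int × Int)) (min_group_size : Int), Dom_get_sorted_similar_groups similar_groups min_group_size → Spec_get_sorted_similar_groups similar_groups min_group_size (get_sorted_similar_groups similar_groups min_group_size)

-- ===== LEMMAS AND PROOFS =====

-- neighbour list of a node: d[s][0] if present, else []
def pvNbr (d : PySem.Dict Int (List Int × Int)) (s : Int) : List Int :=
  match d.get? s with
  | none => []
  | some e => e.1

-- a node set closed under taking neighbours
def pvClosed (d : PySem.Dict Int (List Int × Int)) (S : List Int) : Prop :=
  ∀ s ∈ S, ∀ t ∈ pvNbr d s, t ∈ S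

theorem pvNbr_subset_U (d : PySem.Dict Int (List Int × Int)) (s : Int) :
    ∀ x ∈ pvNbr d s, x ∈ pvU d := by
  intro x hx
  unfold pvNbr at hx
  cases h : d.get? s with
  | none => rw [h] at hx; simp at hx
  | some e =>
      rw [h] at hx
      have hm := PySem.Dict.mem_items_of_get?_eq_some (d := d) (k := s) (v := e) h
      exact List.mem_flatMap.mpr ⟨(s, e), hm, by simp [hx]⟩

theorem pvKey_mem_U (d : PySem.Dict Int (List Int × Int)) {s : Int} {e : List Int × Int}
    (h : (s, e) ∈ d.items) : s ∈ pvU d :=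
  List.mem_flatMap.mpr ⟨(s, e), h, by simp⟩

theorem pvLen_le_B (d : PySem.Dict Int (List Int × Int)) {g : List Int}
    (hnd : g.Nodup) (hsub : ∀ x ∈ g, x ∈ pvU d) :
    g.length ≤ (PySem.Set.ofList (pvU d)).length := by
  have h1 : g ⊆ PySem.Set.ofList (pvU d) := by
    intro x hx; exact (PySem.Set.mem_ofList _ _).mpr (hsub x hx)
  exact (hnd.subperm h1).length_le

theorem mem_expandA (d : PySem.Dict Int (List Int × Int)) (x : Int) :
    ∀ (g : List Int) (acc : PySem.Set Int),
      (x ∈ List.foldl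
        (fun na s => if d.contains s then PySem.Set.update na (((d.get? s).getD ([], 0)).1) else na)
        acc g
      ↔ x ∈ acc ∨ ∃ s ∈ g, x ∈ pvNbr d s) := by
  intro g
  induction g with
  | nil => intro acc; simp
  | cons a g ih =>
      intro acc
      simp only [List.foldl_cons]
      cases hc : d.contains a with
      | false =>
          have hga : d.get? a = none := by
            rw [PySem.Dict.contains_eq_isSome_get?] at hc
            exact Option.not_isSome_iff_eq_none.mp (by simp [hc])
          rw [if_neg (by simp [hc]), ih]
          constructor
          · rintro (h | h)
            · exact Or.inl h
            · exact Or.inr (by rcases h with ⟨s, hs, hxs⟩; exact ⟨s, List.mem_cons_of_mem _ hs, hxs⟩)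
          · rintro (h | ⟨s, hs, hxs⟩)
            · exact Or.inl h
            · rcases List.mem_cons.mp hs with rfl | hs'
              · simp [pvNbr, hga] at hxs
              · exact Or.inr ⟨s, hs', hxs⟩
      | true =>
          obtain ⟨e, hga⟩ : ∃ e, d.get? a = some e := by
            rw [PySem.Dict.contains_eq_isSome_get?] at hc
            exact Option.isSome_iff_exists.mp hc
          rw [if_pos (by simp [hc]), ih]
          have hnb : pvNbr d a = e.1 := by simp [pvNbr, hga]
          constructor
          · rintro (h | h)
            · rcases (PySem.Set.mem_update _ _ _).mp h with h' | h'
              · exact Or.inl h'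
              · exact Or.inr ⟨a, List.mem_cons_self, by rw [hnb]; simpa [hga] using h'⟩
            · exact Or.inr (by rcases h with ⟨s, hs, hxs⟩; exact ⟨s, List.mem_cons_of_mem _ hs, hxs⟩)
          · rintro (h | ⟨s, hs, hxs⟩)
            · exact Or.inl ((PySem.Set.mem_update _ _ _).mpr (Or.inl h))
            · rcases List.mem_cons.mp hs with rfl | hs'
              · exact Or.inl ((PySem.Set.mem_update _ _ _).mpr (Or.inr (by simp only [hga, Option.getD_some]; exact hnb ▸ hxs)))
              · exact Or.inr ⟨s, hs', hxs⟩

theorem mem_pvExpandA (d : PySem.Dict Int (List Int × Int)) (g : PySem.Set Int) (x : Int) :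
    x ∈ pvExpandA d g ↔ ∃ s ∈ g, x ∈ pvNbr d s := by
  unfold pvExpandA
  rw [mem_expandA]
  simp [PySem.Set.empty]

theorem loopA_spec (d : PySem.Dict Int (List Int × Int)) :
    ∀ (fuel : Nat) (g : PySem.Set Int), g.Nodup → (∀ x ∈ g, x ∈ pvU d) →
      (PySem.Set.ofList (pvU d)).length < fuel + g.length →
      (∀ x ∈ g, x ∈ pvLoopA d fuel g) ∧
      (pvLoopA d fuel g).Nodup ∧
      (∀ x ∈ pvLoopA d fuel g, x ∈ pvU d) ∧
      pvClosed d (pvLoopA d fuel g) ∧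
      (∀ T, pvClosed d T → (∀ x ∈ g, x ∈ T) → ∀ x ∈ pvLoopA d fuel g, x ∈ T) := by
  intro fuel
  induction fuel with
  | zero =>
      intro g hnd hsub hm
      exact absurd hm (by have := pvLen_le_B d hnd hsub; omega)
  | succ n ih =>
      intro g hnd hsub hm
      simp only [pvLoopA]
      cases hss : PySem.Set.issubset (pvExpandA d g) g with
      | true =>
          simp only [if_pos rfl]
          refine ⟨fun x hx => hx, hnd, hsub, ?_, fun T _ hT x hx => hT x hx⟩
          intro s hs t ht
          exact (PySem.Set.issubset_iff _ _).mp hss t ((mem_pvExpandA d g t).mpr ⟨s, hs, ht⟩)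
      | false =>
          simp only [Bool.false_eq_true, if_false]
          set g' := PySem.Set.update g (pvExpandA d g) with hg'
          have hmemg' : ∀ x, x ∈ g' ↔ x ∈ g ∨ ∃ s ∈ g, x ∈ pvNbr d s := by
            intro x
            rw [hg', PySem.Set.mem_update, mem_pvExpandA]
          have hnd' : g'.Nodup := PySem.Set.nodup_update _ _ hnd
          have hsub' : ∀ x ∈ g', x ∈ pvU d := by
            intro x hx
            rcases (hmemg' x).mp hx with h | ⟨s, _, hxs⟩
            · exact hsub x h
            · exact pvNbr_subset_U d s x hxs
          have hlt : g.length < g'.length := by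
            obtain ⟨y, hy, hyn⟩ : ∃ y, y ∈ pvExpandA d g ∧ y ∉ g := by
              by_contra hcon
              push_neg at hcon
              have : PySem.Set.issubset (pvExpandA d g) g = true :=
                (PySem.Set.issubset_iff _ _).mpr fun x hx => hcon x hx
              simp [this] at hss
            have hyg' : y ∈ g' := (hmemg' y).mpr (Or.inr (by
              rcases (mem_pvExpandA d g y).mp hy with ⟨s, hs, hys⟩; exact ⟨s, hs, hys⟩))
            have hcons : (y :: g).Nodup := List.nodup_cons.mpr ⟨hyn, hnd⟩
            have hsubc : (y :: g) ⊆ g' := by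
              intro z hz
              rcases List.mem_cons.mp hz with rfl | hz'
              · exact hyg'
              · exact (hmemg' z).mpr (Or.inl hz')
            have := (hcons.subperm hsubc).length_le
            simpa using this
          have hm' : (PySem.Set.ofList (pvU d)).length < n + g'.length := by omega
          obtain ⟨ih1, ih2, ih3, ih4, ih5⟩ := ih g' hnd' hsub' hm'
          refine ⟨fun x hx => ih1 x ((hmemg' x).mpr (Or.inl hx)), ih2, ih3, ih4, ?_⟩
          intro T hT hgT x hx
          refine ih5 T hT ?_ x hx
          intro z hz
          rcases (hmemg' z).mp hz with h | ⟨s, hs, hzs⟩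
          · exact hgT z h
          · exact hT s (hgT s hs) z hzs

theorem bfsFold_spec : ∀ (ts : List Int) (v : PySem.Set Int) (r : List Int),
    (∀ x, x ∈ (List.foldl pvBfsStep (v, r) ts).1 ↔ x ∈ v ∨ x ∈ ts) ∧
    (∀ x ∈ (List.foldl pvBfsStep (v, r) ts).2, x ∈ r ∨ x ∈ ts) ∧
    (∀ x ∈ r, x ∈ (List.foldl pvBfsStep (v, r) ts).2) ∧
    (∀ x ∈ (List.foldl pvBfsStep (v, r) ts).1, x ∈ v ∨ x ∈ (List.foldl pvBfsStep (v, r) ts).2) ∧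
    (v.Nodup → (List.foldl pvBfsStep (v, r) ts).1.Nodup) ∧
    (List.foldl pvBfsStep (v, r) ts).1.length + r.length
      = v.length + (List.foldl pvBfsStep (v, r) ts).2.length := by
  intro ts
  induction ts with
  | nil =>
      intro v r
      exact ⟨by simp, by simp, by simp, fun x hx => Or.inl hx, fun h => h, rfl⟩
  | cons t ts ih =>
      intro v r
      simp only [List.foldl_cons, pvBfsStep]
      cases hc : PySem.Set.contains v t with
      | true =>
          have hm : t ∈ v := (PySem.Set.contains_iff v t).mp hc
          rw [if_pos rfl]
          obtain ⟨a, b, c, d', e, f⟩ := ih v r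
          refine ⟨?_, ?_, c, ?_, e, by omega⟩
          · intro x
            rw [a x]
            constructor
            · rintro (h | h)
              · exact Or.inl h
              · exact Or.inr (List.mem_cons_of_mem _ h)
            · rintro (h | h)
              · exact Or.inl h
              · rcases List.mem_cons.mp h with rfl | h'
                · exact Or.inl hm
                · exact Or.inr h'
          · intro x hx
            rcases b x hx with h | h
            · exact Or.inl h
            · exact Or.inr (List.mem_cons_of_mem _ h)
          · exact d'
      | false =>
          have hm : t ∉ v := by
            intro h
            rw [(PySem.Set.contains_iff v t).mpr h] at hc
            cases hc
          rw [if_neg (by simp [hc])]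
          obtain ⟨a, b, c, d', e, f⟩ := ih (PySem.Set.add v t) (r ++ [t])
          have hla : (PySem.Set.add v t).length = v.length + 1 := by
            have : PySem.Set.add v t = v ++ [t] := by
              unfold PySem.Set.add
              rw [if_neg (fun h => hm ((PySem.Set.contains_iff v t).mp h))]
            simp [this]
          refine ⟨?_, ?_, ?_, ?_, ?_, by simp at f ⊢; omega⟩
          · intro x
            rw [a x, PySem.Set.mem_add]
            constructor
            · rintro ((h | rfl) | h)
              · exact Or.inl h
              · exact Or.inr List.mem_cons_self
              · exact Or.inr (List.mem_cons_of_mem _ h)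
            · rintro (h | h)
              · exact Or.inl (Or.inl h)
              · rcases List.mem_cons.mp h with rfl | h'
                · exact Or.inl (Or.inr rfl)
                · exact Or.inr h'
          · intro x hx
            rcases b x hx with h | h
            · rcases List.mem_append.mp h with h' | h'
              · exact Or.inl h'
              · exact Or.inr (by simpa using List.mem_cons.mpr (Or.inl (by simpa using h')))
            · exact Or.inr (List.mem_cons_of_mem _ h)
          · intro x hx
            exact c x (List.mem_append.mpr (Or.inl hx))
          · intro x hx
            rcases d' x hx with h | h
            · rcases (PySem.Set.mem_add v t x).mp h with h' | rfl
              · exact Or.inl h'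
              · exact Or.inr (c x (by simp))
            · exact Or.inr h
          · intro hv
            exact e (PySem.Set.nodup_add _ _ hv)

theorem bfs_spec (d : PySem.Dict Int (List Int × Int)) :
    ∀ (fuel : Nat) (visited : PySem.Set Int) (stack : List Int),
      visited.Nodup → (∀ x ∈ visited, x ∈ pvU d) → (∀ x ∈ stack, x ∈ visited) →
      (∀ s ∈ visited, s ∉ stack → ∀ t ∈ pvNbr d s, t ∈ visited) →
      2 * (PySem.Set.ofList (pvU d)).length + stack.length < fuel + 2 * visited.length →
      (∀ x ∈ visited, x ∈ pvBfsB d fuel visited stack) ∧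
      (pvBfsB d fuel visited stack).Nodup ∧
      (∀ x ∈ pvBfsB d fuel visited stack, x ∈ pvU d) ∧
      pvClosed d (pvBfsB d fuel visited stack) ∧
      (∀ T, pvClosed d T → (∀ x ∈ visited, x ∈ T) → ∀ x ∈ pvBfsB d fuel visited stack, x ∈ T) := by
  intro fuel
  induction fuel with
  | zero =>
      intro visited stack hnd hsub _ _ hm
      exact absurd hm (by have := pvLen_le_B d hnd hsub; omega)
  | succ n ih =>
      intro visited stack hnd hsub hstk hinv hm
      match stack with
      | [] =>
          simp only [pvBfsB]
          refine ⟨fun x hx => hx, hnd, hsub, ?_, fun T _ hT x hx => hT x hx⟩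
          intro s hs t ht
          exact hinv s hs (by simp) t ht
      | x :: xs =>
          simp only [pvBfsB]
          set s := (x :: xs).getLast (List.cons_ne_nil x xs) with hsdef
          set rest := (x :: xs).dropLast with hrdef
          have hsplit : rest ++ [s] = x :: xs := List.dropLast_append_getLast _
          have hlen : rest.length + 1 = (x :: xs).length := by
            rw [← hsplit]; simp
          have hrest_sub : ∀ y ∈ rest, y ∈ x :: xs := by
            intro y hy; rw [← hsplit]; exact List.mem_append.mpr (Or.inl hy)
          have hs_mem : s ∈ x :: xs := by
            rw [← hsplit]; exact List.mem_append.mpr (Or.inr (by simp))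
          cases hgs : d.get? s with
          | none =>
              have hnb : pvNbr d s = [] := by simp [pvNbr, hgs]
              refine ih visited rest hnd hsub (fun y hy => hstk y (hrest_sub y hy)) ?_ (by simp at hlen hm ⊢; omega)
              intro z hz hzr t ht
              by_cases hzs : z = s
              · subst hzs; simp [hnb] at ht
              · exact hinv z hz (fun hzin => by
                  rw [← hsplit] at hzin
                  rcases List.mem_append.mp hzin with h | h
                  · exact hzr h
                  · exact hzs (by simpa using h)) t ht
          | some entry =>
              have hnb : pvNbr d s = entry.1 := by simp [pvNbr, hgs]
              obtain ⟨a, b, c, d', e, f⟩ := bfsFold_spec entry.1 visited rest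
              set q := List.foldl pvBfsStep (visited, rest) entry.1 with hq
              have hq1subU : ∀ y ∈ q.1, y ∈ pvU d := by
                intro y hy
                rcases (a y).mp hy with h | h
                · exact hsub y h
                · exact pvNbr_subset_U d s y (by rw [hnb]; exact h)
              have hq2subq1 : ∀ y ∈ q.2, y ∈ q.1 := by
                intro y hy
                rcases b y hy with h | h
                · exact (a y).mpr (Or.inl (hstk y (hrest_sub y h)))
                · exact (a y).mpr (Or.inr h)
              have hinv' : ∀ z ∈ q.1, z ∉ q.2 → ∀ t ∈ pvNbr d z, t ∈ q.1 := by
                intro z hz hzq t ht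
                rcases d' z hz with hzv | hzq2
                · by_cases hzs : z = s
                  · subst hzs
                    exact (a t).mpr (Or.inr (by rw [← hnb]; exact ht))
                  · have hznr : z ∉ rest := fun h => hzq (c z h)
                    have hzst : z ∉ x :: xs := by
                      rw [← hsplit]
                      intro h
                      rcases List.mem_append.mp h with h' | h'
                      · exact hznr h'
                      · exact hzs (by simpa using h')
                    exact (a t).mpr (Or.inl (hinv z hzv hzst t ht))
                · exact absurd hzq2 hzq
              have hmq : 2 * (PySem.Set.ofList (pvU d)).length + q.2.length < n + 2 * q.1.length := by
                have hvq : visited.length ≤ q.1.length := by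
                  have hsubv : visited ⊆ q.1 := fun y hy => (a y).mpr (Or.inl hy)
                  exact (hnd.subperm hsubv).length_le
                simp at hlen hm
                omega
              obtain ⟨i1, i2, i3, i4, i5⟩ := ih q.1 q.2 (e hnd) hq1subU hq2subq1 hinv' hmq
              refine ⟨fun y hy => i1 y ((a y).mpr (Or.inl hy)), i2, i3, i4, ?_⟩
              intro T hT hvT y hy
              refine i5 T hT ?_ y hy
              intro z hz
              rcases (a z).mp hz with h | h
              · exact hvT z h
              · exact hT s (hvT s (hstk s hs_mem)) z (by rw [hnb]; exact h)

-- the two inner loops compute the same node set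
theorem groups_agree (d : PySem.Dict Int (List Int × Int)) (hnd : d.keys.Nodup)
    {seed : Int} {sims : List Int} {w : Int} (hkv : (seed, (sims, w)) ∈ d.items) :
    (pvLoopA d ((pvU d).length + 1)
        (PySem.Set.union (PySem.Set.ofList [seed]) (PySem.Set.ofList sims))).Perm
      (pvBfsB d (2 * (pvU d).length + 2) (PySem.Set.ofList [seed]) [seed]) := by
  have hget : d.get? seed = some (sims, w) := PySem.Dict.get?_of_mem_items d hkv hnd
  have hnbseed : pvNbr d seed = sims := by simp [pvNbr, hget]
  have hseedU : seed ∈ pvU d := pvKey_mem_U d hkv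
  have hsimsU : ∀ x ∈ sims, x ∈ pvU d := by
    intro x hx
    exact pvNbr_subset_U d seed x (by rw [hnbseed]; exact hx)
  set g0 := PySem.Set.union (PySem.Set.ofList [seed]) (PySem.Set.ofList sims) with hg0
  have hg0mem : ∀ x, x ∈ g0 ↔ x = seed ∨ x ∈ sims := by
    intro x
    rw [hg0, PySem.Set.mem_union, PySem.Set.mem_ofList, PySem.Set.mem_ofList]
    simp
  have hg0nd : g0.Nodup := PySem.Set.nodup_union _ _ (PySem.Set.nodup_ofList _)
  have hg0U : ∀ x ∈ g0, x ∈ pvU d := by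
    intro x hx
    rcases (hg0mem x).mp hx with rfl | h
    · exact hseedU
    · exact hsimsU x h
  have hBle := PySem.Set.length_ofList_le (pvU d)
  obtain ⟨a1, a2, a3, a4, a5⟩ := loopA_spec d ((pvU d).length + 1) g0 hg0nd hg0U (by omega)
  have hv0 : PySem.Set.ofList [seed] = [seed] := PySem.Set.ofList_eq_self_of_nodup [seed] (List.nodup_singleton seed)
  obtain ⟨b1, b2, b3, b4, b5⟩ := bfs_spec d (2 * (pvU d).length + 2) (PySem.Set.ofList [seed]) [seed]
    (by rw [hv0]; exact List.nodup_singleton seed)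
    (by rw [hv0]; intro x hx; rcases List.mem_singleton.mp hx with rfl; exact hseedU)
    (by rw [hv0]; intro x hx; exact hx)
    (by intro z hz hzn; rw [hv0] at hz; exact absurd hz hzn)
    (by rw [hv0]; simp; omega)
  set RA := pvLoopA d ((pvU d).length + 1) g0
  set RB := pvBfsB d (2 * (pvU d).length + 2) (PySem.Set.ofList [seed]) [seed]
  have hseedRB : seed ∈ RB := b1 seed (by rw [hv0]; simp)
  have hAB : ∀ x ∈ RA, x ∈ RB := by
    apply a5 RB b4
    intro z hz
    rcases (hg0mem z).mp hz with rfl | h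
    · exact hseedRB
    · exact b4 seed hseedRB z (by rw [hnbseed]; exact h)
  have hBA : ∀ x ∈ RB, x ∈ RA := by
    apply b5 RA a4
    intro z hz
    rw [hv0] at hz
    rcases List.mem_singleton.mp hz with rfl
    exact a1 _ ((hg0mem _).mpr (Or.inl rfl))
  exact (List.perm_ext_iff_of_nodup a2 b2).mpr fun x => ⟨hAB x, hBA x⟩

theorem outer_agree (d : PySem.Dict Int (List Int × Int)) (hnd : d.keys.Nodup) (m : Int) :
    ∀ (l : List (Int × List Int × Int)), (∀ kv ∈ l, kv ∈ d.items) →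
    ∀ (pA pB : PySem.Set Int) (gs : List (List Int)), (∀ x, x ∈ pA ↔ x ∈ pB) →
      (List.foldl (pvStepA d ((pvU d).length + 1) m) (pA, gs) l).2 =
      (List.foldl (pvStepB d (2 * (pvU d).length + 2) m) (pB, gs) (l.map (·.1))).2 := by
  intro l
  induction l with
  | nil => intro _ pA pB gs _; simp
  | cons kv l ih =>
      intro hmem pA pB gs hpp
      simp only [List.map_cons, List.foldl_cons]
      have hkv : kv ∈ d.items := hmem kv List.mem_cons_self
      have hc : PySem.Set.contains pA kv.1 = PySem.Set.contains pB kv.1 := by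
        rw [Bool.eq_iff_iff, PySem.Set.contains_iff, PySem.Set.contains_iff]
        exact hpp kv.1
      have hperm := groups_agree d hnd (seed := kv.1) (sims := kv.2.1) (w := kv.2.2)
        (by simpa using hkv)
      set RA := pvLoopA d ((pvU d).length + 1)
        (PySem.Set.union (PySem.Set.ofList [kv.1]) (PySem.Set.ofList kv.2.1)) with hRA
      set RB := pvBfsB d (2 * (pvU d).length + 2) (PySem.Set.ofList [kv.1]) [kv.1] with hRB
      simp only [pvStepA, pvStepB]
      rw [← hc]
      cases hc' : PySem.Set.contains pA kv.1 with
      | true =>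
          simp only [if_pos rfl]
          exact ih (fun z hz => hmem z (List.mem_cons_of_mem _ hz)) pA pB gs hpp
      | false =>
          simp only [Bool.false_eq_true, if_false, ← hRA, ← hRB]
          have hlen : RA.length = RB.length := hperm.length_eq
          have hsorted : PySem.List.sorted RA (fun x => x) = PySem.List.sorted RB (fun x => x) :=
            (PySem.List.sorted_id_eq_sorted_id_iff_perm RA RB).mpr hperm
          rw [← hlen]
          by_cases hsz : (RA.length : Int) ≥ m
          · rw [if_pos hsz, if_pos hsz, hsorted]
            apply ih (fun z hz => hmem z (List.mem_cons_of_mem _ hz))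
            intro x
            rw [PySem.Set.mem_update, PySem.Set.mem_union, hpp x, hperm.mem_iff]
          · rw [if_neg hsz, if_neg hsz]
            exact ih (fun z hz => hmem z (List.mem_cons_of_mem _ hz)) pA pB gs hpp

-- ===== VERDICT (by name: the statement is the Claim_ definition above) =====
theorem get_sorted_similar_groups_spec : Claim_equal_get_sorted_similar_groups := by
  unfold Claim_equal_get_sorted_similar_groups
  intro sg m _
  unfold Spec_get_sorted_similar_groups
  unfold get_sorted_similar_groups get_sorted_similar_groups_alt
  simp only []
  set d := PySem.Dict.ofList sg with hd
  have hnd : d.keys.Nodup := PySem.Dict.nodup_keys_ofList sg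
  have hkeys : d.keys = d.items.map (·.1) := rfl
  rw [hkeys]
  rw [outer_agree d hnd m d.items (fun _ h => h) PySem.Set.empty PySem.Set.empty []
    (fun x => Iff.rfl)]
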